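-- pv_equiv track=rewrite | github.com/tlhhmd/free-exercise-graph | app/build_site.py | _derive_movement_family
-- ===== SOURCE A (Python) =====
-- def _derive_movement_family(patterns: list[str]) -> str:
--     pattern_set = set(patterns)
--     families = [
--         ("squat", {"KneeDominant", "Squat", "Lunge", "SplitSquat"}),
--         ("hinge", {"HipHinge"}),
--         ("push", {"Push", "VerticalPush", "HorizontalPush"}),
--         ("pull", {"Pull", "VerticalPull", "HorizontalPull"}),
--         ("core", {"TrunkStability", "AntiExtension", "AntiRotation", "AntiFlexion", "AntiLateralFlexion", "IsometricHold"}),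
--         ("carry", {"Carry"}),
--         ("locomotion", {"Locomotion", "LateralLocomotion"}),
--         ("rotation", {"Rotation"}),
--         ("mobility", {"Mobility", "SoftTissue"}),
--     ]
--     for family, members in families:
--         if pattern_set & members:
--             return family
--     return "general"
-- ===== SOURCE B (Python) =====
-- _FAMILIES = [
--     ("squat", {"KneeDominant", "Squat", "Lunge", "SplitSquat"}),
--     ("hinge", {"HipHinge"}),
--     ("push", {"Push", "VerticalPush", "HorizontalPush"}),
--     ("pull", {"Pull", "VerticalPull", "HorizontalPull"}),
--     ("core", {"TrunkStability", "AntiExtension", "AntiRotation", "AntiFlexion", "AntiLateralFlexion", "IsometricHold"}),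
--     ("carry", {"Carry"}),
--     ("locomotion", {"Locomotion", "LateralLocomotion"}),
--     ("rotation", {"Rotation"}),
--     ("mobility", {"Mobility", "SoftTissue"}),
-- ]
--
-- _FAMILY_NAMES = [name for name, _ in _FAMILIES]
-- _PRIORITY = {member: idx for idx, (_, members) in enumerate(_FAMILIES) for member in members}
--
--
-- def _derive_movement_family(patterns: list[str]) -> str:
--     best = len(_FAMILY_NAMES)
--     for p in patterns:
--         i = _PRIORITY.get(p)
--         if i is not None and i < best:
--             best = i
--     return _FAMILY_NAMES[best] if best < len(_FAMILY_NAMES) else "general"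
-- ===== Notes on version B (the rewrite author's own statement) =====
-- stated objective: idiomatic
-- what changed: Replaces the family-by-family set-intersection scan with a flat pattern-to-priority-index dict built once; a single pass over the input patterns keeps the minimum priority index, reproducing A's priority-ordered first match.
import Mathlib
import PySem

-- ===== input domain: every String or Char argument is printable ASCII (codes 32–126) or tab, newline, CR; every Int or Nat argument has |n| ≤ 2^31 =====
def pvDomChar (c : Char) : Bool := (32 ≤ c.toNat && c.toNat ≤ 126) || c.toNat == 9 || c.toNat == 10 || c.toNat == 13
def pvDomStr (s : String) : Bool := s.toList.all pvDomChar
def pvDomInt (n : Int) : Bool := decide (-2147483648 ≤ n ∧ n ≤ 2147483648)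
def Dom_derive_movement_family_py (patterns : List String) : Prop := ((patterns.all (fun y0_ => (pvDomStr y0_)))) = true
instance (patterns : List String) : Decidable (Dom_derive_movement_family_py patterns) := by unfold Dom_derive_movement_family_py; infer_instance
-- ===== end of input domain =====

-- B replaces A's family-by-family set intersections with one flat pattern→priority dict and a single
-- min-reduction over the input patterns (objective: idiomatic/alternative; same observable behaviour).

-- ===== PORT A =====
-- the literal `families` list of A; each set literal is PySem.Set.ofList of its members
def pvFamiliesA : List (String × PySem.Set String) :=
  [ ("squat", PySem.Set.ofList ["KneeDominant", "Squat", "Lunge", "SplitSquat"]),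
    ("hinge", PySem.Set.ofList ["HipHinge"]),
    ("push", PySem.Set.ofList ["Push", "VerticalPush", "HorizontalPush"]),
    ("pull", PySem.Set.ofList ["Pull", "VerticalPull", "HorizontalPull"]),
    ("core", PySem.Set.ofList ["TrunkStability", "AntiExtension", "AntiRotation", "AntiFlexion", "AntiLateralFlexion", "IsometricHold"]),
    ("carry", PySem.Set.ofList ["Carry"]),
    ("locomotion", PySem.Set.ofList ["Locomotion", "LateralLocomotion"]),
    ("rotation", PySem.Set.ofList ["Rotation"]),
    ("mobility", PySem.Set.ofList ["Mobility", "SoftTissue"]) ]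

-- `for family, members in families: if pattern_set & members: return family` / `return "general"`
def pvScanA (s : PySem.Set String) : List (String × PySem.Set String) → String
  | [] => "general"
  | (fam, mem) :: rest => if PySem.Set.inter s mem ≠ [] then fam else pvScanA s rest

def derive_movement_family_py (patterns : List String) : String :=
  pvScanA (PySem.Set.ofList patterns) pvFamiliesA

-- ===== PORT B =====
def pvFamilyNames : List String :=
  ["squat", "hinge", "push", "pull", "core", "carry", "locomotion", "rotation", "mobility"]

-- the reverse-lookup dict _PRIORITY (member → family index); keys are pairwise distinct, so the
-- insertion order (Python set iteration order) is irrelevant to every lookup made with it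
def pvPriority : PySem.Dict String Int :=
  PySem.Dict.mk
    [ ("KneeDominant", 0), ("Squat", 0), ("Lunge", 0), ("SplitSquat", 0),
      ("HipHinge", 1),
      ("Push", 2), ("VerticalPush", 2), ("HorizontalPush", 2),
      ("Pull", 3), ("VerticalPull", 3), ("HorizontalPull", 3),
      ("TrunkStability", 4), ("AntiExtension", 4), ("AntiRotation", 4), ("AntiFlexion", 4), ("AntiLateralFlexion", 4), ("IsometricHold", 4),
      ("Carry", 5),
      ("Locomotion", 6), ("LateralLocomotion", 6),
      ("Rotation", 7),
      ("Mobility", 8), ("SoftTissue", 8) ]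

def derive_movement_family_py_alt (patterns : List String) : String :=
  let best := patterns.foldl (fun best p =>
      match PySem.Dict.get? pvPriority p with
      | some i => if i < best then i else best
      | none => best) (9 : Int)
  -- `_FAMILY_NAMES[best]` is reached only with 0 ≤ best < 9, where pyGetD is exact
  if best < 9 then PySem.List.pyGetD pvFamilyNames best "general" else "general"

-- ===== PRECONDITION & SPEC =====
def Spec_derive_movement_family_py (patterns : List String) (out : String) : Prop := out = derive_movement_family_py_alt patterns
instance (patterns : List String) (out : String) : Decidable (Spec_derive_movement_family_py patterns out) := by unfold Spec_derive_movement_family_py; infer_instance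

-- ===== CLAIM (what is proved, stated in full; the proofs are below) =====
def Claim_equal_derive_movement_family_py : Prop := ∀ (patterns : List String), Dom_derive_movement_family_py patterns → Spec_derive_movement_family_py patterns (derive_movement_family_py patterns)

-- ===== LEMMAS AND PROOFS =====

-- priority of one pattern string, 9 for "no family"
def prioI (p : String) : Int := (PySem.Dict.get? pvPriority p).getD 9

-- the minimum priority over a pattern list (9 = nothing matched)
def specIdx (pats : List String) : Int := pats.foldr (fun p m => min (prioI p) m) 9

theorem prio_mem (p : String) (i : Int) (h : prioI p = i) (hne : i ≠ 9) :
    (p, i) ∈ pvPriority.items := by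
  unfold prioI at h
  rcases hq : PySem.Dict.get? pvPriority p with _ | v
  · rw [hq] at h; simp at h; omega
  · rw [hq] at h; simp at h; subst h
    exact PySem.Dict.mem_items_of_get?_eq_some _ hq

theorem prio_range (p : String) : 0 ≤ prioI p ∧ prioI p ≤ 9 := by
  rcases hq : PySem.Dict.get? pvPriority p with _ | v
  · unfold prioI; rw [hq]; simp
  · have hm := PySem.Dict.mem_items_of_get?_eq_some _ hq
    unfold prioI; rw [hq]; simp
    simp only [pvPriority, Prod.mk.injEq, List.mem_cons, List.not_mem_nil, or_false] at hm
    omega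

theorem mem_iff_0 (p : String) : p ∈ (["KneeDominant", "Squat", "Lunge", "SplitSquat"] : List String) ↔ prioI p = 0 := by
  constructor
  · intro h; fin_cases h <;> decide
  · intro h
    have hm := prio_mem p 0 h (by decide)
    simp only [pvPriority, Prod.mk.injEq, List.mem_cons, List.not_mem_nil, or_false] at hm
    simp only [List.mem_cons, List.not_mem_nil, or_false]
    tauto

theorem mem_iff_1 (p : String) : p ∈ (["HipHinge"] : List String) ↔ prioI p = 1 := by
  constructor
  · intro h; fin_cases h <;> decide
  · intro h
    have hm := prio_mem p 1 h (by decide)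
    simp only [pvPriority, Prod.mk.injEq, List.mem_cons, List.not_mem_nil, or_false] at hm
    simp only [List.mem_cons, List.not_mem_nil, or_false]
    tauto

theorem mem_iff_2 (p : String) : p ∈ (["Push", "VerticalPush", "HorizontalPush"] : List String) ↔ prioI p = 2 := by
  constructor
  · intro h; fin_cases h <;> decide
  · intro h
    have hm := prio_mem p 2 h (by decide)
    simp only [pvPriority, Prod.mk.injEq, List.mem_cons, List.not_mem_nil, or_false] at hm
    simp only [List.mem_cons, List.not_mem_nil, or_false]
    tauto

theorem mem_iff_3 (p : String) : p ∈ (["Pull", "VerticalPull", "HorizontalPull"] : List String) ↔ prioI p = 3 := by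
  constructor
  · intro h; fin_cases h <;> decide
  · intro h
    have hm := prio_mem p 3 h (by decide)
    simp only [pvPriority, Prod.mk.injEq, List.mem_cons, List.not_mem_nil, or_false] at hm
    simp only [List.mem_cons, List.not_mem_nil, or_false]
    tauto

theorem mem_iff_4 (p : String) : p ∈ (["TrunkStability", "AntiExtension", "AntiRotation", "AntiFlexion", "AntiLateralFlexion", "IsometricHold"] : List String) ↔ prioI p = 4 := by
  constructor
  · intro h; fin_cases h <;> decide
  · intro h
    have hm := prio_mem p 4 h (by decide)
    simp only [pvPriority, Prod.mk.injEq, List.mem_cons, List.not_mem_nil, or_false] at hm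
    simp only [List.mem_cons, List.not_mem_nil, or_false]
    tauto

theorem mem_iff_5 (p : String) : p ∈ (["Carry"] : List String) ↔ prioI p = 5 := by
  constructor
  · intro h; fin_cases h <;> decide
  · intro h
    have hm := prio_mem p 5 h (by decide)
    simp only [pvPriority, Prod.mk.injEq, List.mem_cons, List.not_mem_nil, or_false] at hm
    simp only [List.mem_cons, List.not_mem_nil, or_false]
    tauto

theorem mem_iff_6 (p : String) : p ∈ (["Locomotion", "LateralLocomotion"] : List String) ↔ prioI p = 6 := by
  constructor
  · intro h; fin_cases h <;> decide
  · intro h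
    have hm := prio_mem p 6 h (by decide)
    simp only [pvPriority, Prod.mk.injEq, List.mem_cons, List.not_mem_nil, or_false] at hm
    simp only [List.mem_cons, List.not_mem_nil, or_false]
    tauto

theorem mem_iff_7 (p : String) : p ∈ (["Rotation"] : List String) ↔ prioI p = 7 := by
  constructor
  · intro h; fin_cases h <;> decide
  · intro h
    have hm := prio_mem p 7 h (by decide)
    simp only [pvPriority, Prod.mk.injEq, List.mem_cons, List.not_mem_nil, or_false] at hm
    simp only [List.mem_cons, List.not_mem_nil, or_false]
    tauto

theorem mem_iff_8 (p : String) : p ∈ (["Mobility", "SoftTissue"] : List String) ↔ prioI p = 8 := by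
  constructor
  · intro h; fin_cases h <;> decide
  · intro h
    have hm := prio_mem p 8 h (by decide)
    simp only [pvPriority, Prod.mk.injEq, List.mem_cons, List.not_mem_nil, or_false] at hm
    simp only [List.mem_cons, List.not_mem_nil, or_false]
    tauto

theorem specIdx_nil : specIdx [] = 9 := rfl

theorem specIdx_cons (p : String) (pats : List String) :
    specIdx (p :: pats) = min (prioI p) (specIdx pats) := rfl

theorem specIdx_range (pats : List String) : 0 ≤ specIdx pats ∧ specIdx pats ≤ 9 := by
  induction pats with
  | nil => simp [specIdx_nil]
  | cons p pats ih =>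
    have := prio_range p
    rw [specIdx_cons]; omega

theorem specIdx_le (pats : List String) : ∀ p ∈ pats, specIdx pats ≤ prioI p := by
  induction pats with
  | nil => simp
  | cons q pats ih =>
    intro p hp
    rcases List.mem_cons.mp hp with h | h
    · subst h; rw [specIdx_cons]; omega
    · have := ih p h; rw [specIdx_cons]; omega

theorem specIdx_attained (pats : List String) :
    specIdx pats = 9 ∨ ∃ p ∈ pats, prioI p = specIdx pats := by
  induction pats with
  | nil => left; rfl
  | cons q pats ih =>
    rw [specIdx_cons]
    rcases ih with h | ⟨p, hp, hv⟩
    · by_cases hq : prioI q ≤ 9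
      · right; exact ⟨q, List.mem_cons_self .., by omega⟩
      · left; omega
    · by_cases hle : prioI q ≤ specIdx pats
      · right; exact ⟨q, List.mem_cons_self .., by omega⟩
      · right; exact ⟨p, List.mem_cons_of_mem _ hp, by omega⟩

-- B's fold computes min b (specIdx pats)
theorem foldB_eq (pats : List String) : ∀ b : Int, b ≤ 9 →
    pats.foldl (fun best p =>
      match PySem.Dict.get? pvPriority p with
      | some i => if i < best then i else best
      | none => best) b = min b (specIdx pats) := by
  induction pats with
  | nil => intro b hb; simp [specIdx_nil]; omega
  | cons p pats ih =>
    intro b hb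
    have hstep : (match PySem.Dict.get? pvPriority p with
        | some i => if i < b then i else b
        | none => b) = min b (prioI p) := by
      unfold prioI
      cases PySem.Dict.get? pvPriority p with
      | none => simp; omega
      | some i => simp [Int.min_def]; split_ifs <;> omega
    rw [List.foldl_cons, hstep, ih _ (by have := prio_range p; omega), specIdx_cons]
    omega

theorem altB_eq (pats : List String) :
    derive_movement_family_py_alt pats =
      (if specIdx pats < 9 then PySem.List.pyGetD pvFamilyNames (specIdx pats) "general" else "general") := by
  unfold derive_movement_family_py_alt
  rw [foldB_eq pats 9 (by omega)]
  have := specIdx_range pats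
  have hmin : min (9 : Int) (specIdx pats) = specIdx pats := by omega
  rw [hmin]

-- the scan's condition is empty when no pattern has priority j
theorem inter_empty (pats mem : List String) (j : Int)
    (hmem : ∀ q, q ∈ mem ↔ prioI q = j) (hno : ∀ p ∈ pats, prioI p ≠ j) :
    ¬ (PySem.Set.inter (PySem.Set.ofList pats) (PySem.Set.ofList mem) ≠ []) := by
  rw [not_not, List.eq_nil_iff_forall_not_mem]
  intro x hx
  rw [PySem.Set.mem_inter] at hx
  rcases hx with ⟨h1, h2⟩
  rw [PySem.Set.mem_ofList] at h1 h2
  exact hno x h1 ((hmem x).mp h2)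

theorem inter_nonempty (pats mem : List String) (j : Int) (p : String)
    (hmem : ∀ q, q ∈ mem ↔ prioI q = j) (hp : p ∈ pats) (hv : prioI p = j) :
    PySem.Set.inter (PySem.Set.ofList pats) (PySem.Set.ofList mem) ≠ [] := by
  intro hnil
  have : p ∈ PySem.Set.inter (PySem.Set.ofList pats) (PySem.Set.ofList mem) := by
    rw [PySem.Set.mem_inter, PySem.Set.mem_ofList, PySem.Set.mem_ofList]
    exact ⟨hp, (hmem p).mpr hv⟩
  rw [hnil] at this
  exact absurd this (List.not_mem_nil)

-- ===== VERDICT (by name: the statement is the Claim_ definition above) =====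
theorem derive_movement_family_py_spec : Claim_equal_derive_movement_family_py := by
  intro pats _
  unfold Spec_derive_movement_family_py
  rw [altB_eq]
  have hrange := specIdx_range pats
  have hle := specIdx_le pats
  have hatt := specIdx_attained pats
  have h0 := mem_iff_0
  have h1 := mem_iff_1
  have h2 := mem_iff_2
  have h3 := mem_iff_3
  have h4 := mem_iff_4
  have h5 := mem_iff_5
  have h6 := mem_iff_6
  have h7 := mem_iff_7
  have h8 := mem_iff_8
  obtain ⟨m, hmeq⟩ : ∃ m : Int, specIdx pats = m := ⟨_, rfl⟩
  rw [hmeq] at hrange hle hatt ⊢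
  unfold derive_movement_family_py pvFamiliesA
  simp only [pvScanA]
  by_cases h9 : m = 9
  · -- nothing matched: every intersection is empty
    subst h9
    have hall : ∀ q ∈ pats, prioI q = 9 := fun q hq => by
      have := hle q hq; have := prio_range q; omega
    rw [if_neg (inter_empty pats _ 0 h0 (fun q hq => by have := hall q hq; omega)),
        if_neg (inter_empty pats _ 1 h1 (fun q hq => by have := hall q hq; omega)),
        if_neg (inter_empty pats _ 2 h2 (fun q hq => by have := hall q hq; omega)),
        if_neg (inter_empty pats _ 3 h3 (fun q hq => by have := hall q hq; omega)),
        if_neg (inter_empty pats _ 4 h4 (fun q hq => by have := hall q hq; omega)),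
        if_neg (inter_empty pats _ 5 h5 (fun q hq => by have := hall q hq; omega)),
        if_neg (inter_empty pats _ 6 h6 (fun q hq => by have := hall q hq; omega)),
        if_neg (inter_empty pats _ 7 h7 (fun q hq => by have := hall q hq; omega)),
        if_neg (inter_empty pats _ 8 h8 (fun q hq => by have := hall q hq; omega))]
    simp
  · -- some pattern attains the minimum m < 9
    rcases hatt with h | ⟨p, hp, hv⟩
    · exact absurd h h9
    have hm0 : 0 ≤ m := hrange.1
    have hm9 : m < 9 := by omega
    interval_cases m
    · -- m = 0
      rw [if_pos (inter_nonempty pats _ 0 p h0 hp hv)]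
      simp [PySem.List.pyGetD, pvFamilyNames, PySem.List.pyIdx?, PySem.List.pyGet?]
    · -- m = 1
      rw [if_neg (inter_empty pats _ 0 h0 (fun q hq => by have := hle q hq; omega))]
      rw [if_pos (inter_nonempty pats _ 1 p h1 hp hv)]
      simp [PySem.List.pyGetD, pvFamilyNames, PySem.List.pyIdx?, PySem.List.pyGet?]
    · -- m = 2
      rw [if_neg (inter_empty pats _ 0 h0 (fun q hq => by have := hle q hq; omega))]
      rw [if_neg (inter_empty pats _ 1 h1 (fun q hq => by have := hle q hq; omega))]
      rw [if_pos (inter_nonempty pats _ 2 p h2 hp hv)]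
      simp [PySem.List.pyGetD, pvFamilyNames, PySem.List.pyIdx?, PySem.List.pyGet?]
    · -- m = 3
      rw [if_neg (inter_empty pats _ 0 h0 (fun q hq => by have := hle q hq; omega))]
      rw [if_neg (inter_empty pats _ 1 h1 (fun q hq => by have := hle q hq; omega))]
      rw [if_neg (inter_empty pats _ 2 h2 (fun q hq => by have := hle q hq; omega))]
      rw [if_pos (inter_nonempty pats _ 3 p h3 hp hv)]
      simp [PySem.List.pyGetD, pvFamilyNames, PySem.List.pyIdx?, PySem.List.pyGet?]
    · -- m = 4
      rw [if_neg (inter_empty pats _ 0 h0 (fun q hq => by have := hle q hq; omega))]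
      rw [if_neg (inter_empty pats _ 1 h1 (fun q hq => by have := hle q hq; omega))]
      rw [if_neg (inter_empty pats _ 2 h2 (fun q hq => by have := hle q hq; omega))]
      rw [if_neg (inter_empty pats _ 3 h3 (fun q hq => by have := hle q hq; omega))]
      rw [if_pos (inter_nonempty pats _ 4 p h4 hp hv)]
      simp [PySem.List.pyGetD, pvFamilyNames, PySem.List.pyIdx?, PySem.List.pyGet?]
    · -- m = 5
      rw [if_neg (inter_empty pats _ 0 h0 (fun q hq => by have := hle q hq; omega))]
      rw [if_neg (inter_empty pats _ 1 h1 (fun q hq => by have := hle q hq; omega))]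
      rw [if_neg (inter_empty pats _ 2 h2 (fun q hq => by have := hle q hq; omega))]
      rw [if_neg (inter_empty pats _ 3 h3 (fun q hq => by have := hle q hq; omega))]
      rw [if_neg (inter_empty pats _ 4 h4 (fun q hq => by have := hle q hq; omega))]
      rw [if_pos (inter_nonempty pats _ 5 p h5 hp hv)]
      simp [PySem.List.pyGetD, pvFamilyNames, PySem.List.pyIdx?, PySem.List.pyGet?]
    · -- m = 6
      rw [if_neg (inter_empty pats _ 0 h0 (fun q hq => by have := hle q hq; omega))]
      rw [if_neg (inter_empty pats _ 1 h1 (fun q hq => by have := hle q hq; omega))]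
      rw [if_neg (inter_empty pats _ 2 h2 (fun q hq => by have := hle q hq; omega))]
      rw [if_neg (inter_empty pats _ 3 h3 (fun q hq => by have := hle q hq; omega))]
      rw [if_neg (inter_empty pats _ 4 h4 (fun q hq => by have := hle q hq; omega))]
      rw [if_neg (inter_empty pats _ 5 h5 (fun q hq => by have := hle q hq; omega))]
      rw [if_pos (inter_nonempty pats _ 6 p h6 hp hv)]
      simp [PySem.List.pyGetD, pvFamilyNames, PySem.List.pyIdx?, PySem.List.pyGet?]
    · -- m = 7
      rw [if_neg (inter_empty pats _ 0 h0 (fun q hq => by have := hle q hq; omega))]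
      rw [if_neg (inter_empty pats _ 1 h1 (fun q hq => by have := hle q hq; omega))]
      rw [if_neg (inter_empty pats _ 2 h2 (fun q hq => by have := hle q hq; omega))]
      rw [if_neg (inter_empty pats _ 3 h3 (fun q hq => by have := hle q hq; omega))]
      rw [if_neg (inter_empty pats _ 4 h4 (fun q hq => by have := hle q hq; omega))]
      rw [if_neg (inter_empty pats _ 5 h5 (fun q hq => by have := hle q hq; omega))]
      rw [if_neg (inter_empty pats _ 6 h6 (fun q hq => by have := hle q hq; omega))]
      rw [if_pos (inter_nonempty pats _ 7 p h7 hp hv)]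
      simp [PySem.List.pyGetD, pvFamilyNames, PySem.List.pyIdx?, PySem.List.pyGet?]
    · -- m = 8
      rw [if_neg (inter_empty pats _ 0 h0 (fun q hq => by have := hle q hq; omega))]
      rw [if_neg (inter_empty pats _ 1 h1 (fun q hq => by have := hle q hq; omega))]
      rw [if_neg (inter_empty pats _ 2 h2 (fun q hq => by have := hle q hq; omega))]
      rw [if_neg (inter_empty pats _ 3 h3 (fun q hq => by have := hle q hq; omega))]
      rw [if_neg (inter_empty pats _ 4 h4 (fun q hq => by have := hle q hq; omega))]
      rw [if_neg (inter_empty pats _ 5 h5 (fun q hq => by have := hle q hq; omega))]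
      rw [if_neg (inter_empty pats _ 6 h6 (fun q hq => by have := hle q hq; omega))]
      rw [if_neg (inter_empty pats _ 7 h7 (fun q hq => by have := hle q hq; omega))]
      rw [if_pos (inter_nonempty pats _ 8 p h8 hp hv)]
      simp [PySem.List.pyGetD, pvFamilyNames, PySem.List.pyIdx?, PySem.List.pyGet?]
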